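-- pv_equiv track=rewrite | github.com/sitingGZ/bert-sner-cardio | app/dashpages/extraction.py | retrieve_sentences
-- ===== SOURCE A (Python) =====
-- def retrieve_sentences(tsv_lines):
--     sentences = {}
--     for l in tsv_lines:
--         if '\t' in l:
--             l_split = l.split('\t')
--             sent_idx = int(l_split[0].split('-')[0])
--             if sent_idx not in sentences:
--                 sentences[sent_idx] = []
--             sentences[sent_idx].append(l_split)
--     return sentences
-- ===== SOURCE B (Python) =====
-- def retrieve_sentences(tsv_lines):
--     rows = [l.split('\t') for l in tsv_lines if '\t' in l]
--     keys = [int(r[0].split('-')[0]) for r in rows]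
--     return {k: [r for r, kr in zip(rows, keys) if kr == k]
--             for k in dict.fromkeys(keys)}
-- ===== Notes on version B (the rewrite author's own statement) =====
-- stated objective: alternative
-- what changed: Replaces the incremental dict-of-lists building loop by a two-phase comprehension pipeline: pre-split the tab rows with their sentence indices and build the result as a dict comprehension over the deduplicated keys, collecting each group by a scan over the rows.
import Mathlib
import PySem

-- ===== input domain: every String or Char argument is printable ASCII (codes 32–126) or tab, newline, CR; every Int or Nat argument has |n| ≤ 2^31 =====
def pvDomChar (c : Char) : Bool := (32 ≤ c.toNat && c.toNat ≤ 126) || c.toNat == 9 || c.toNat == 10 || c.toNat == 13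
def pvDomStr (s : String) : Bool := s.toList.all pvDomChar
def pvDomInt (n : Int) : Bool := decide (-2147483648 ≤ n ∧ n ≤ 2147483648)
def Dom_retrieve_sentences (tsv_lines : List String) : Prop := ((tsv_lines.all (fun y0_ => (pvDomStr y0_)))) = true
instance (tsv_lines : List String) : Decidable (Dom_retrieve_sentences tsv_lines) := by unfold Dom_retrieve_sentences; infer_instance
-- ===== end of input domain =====

-- ===== PORT A =====
-- B re-implements A's single-pass dict-of-lists grouping as a two-phase comprehension pipeline (alternative structure, same values).
-- shared primitive: int(l_split[0].split('-')[0]) for a tab-split row (Pre_ guarantees the parse succeeds; getD 0 is never read)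
def pvSentIdx (r : List String) : Int :=
  (PySem.Int.ofStr? (((PySem.Str.split? (r.headD "") "-").getD []).headD "")).getD 0

def retrieve_sentences (tsv_lines : List String) : List (Int × List (List String)) :=
  (tsv_lines.foldl (fun sentences l =>
    if PySem.Str.isIn "\t" l then
      let l_split := (PySem.Str.split? l "\t").getD []
      let sent_idx := pvSentIdx l_split
      let sentences := if sentences.contains sent_idx then sentences
                       else sentences.insert sent_idx ([] : List (List String))
      sentences.modify sent_idx [] (· ++ [l_split])
    else sentences) PySem.Dict.empty).items

-- ===== PORT B =====
def retrieve_sentences_alt (tsv_lines : List String) : List (Int × List (List String)) :=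
  let rows := (tsv_lines.filter (fun l => PySem.Str.isIn "\t" l)).map
                (fun l => (PySem.Str.split? l "\t").getD [])
  let keys := rows.map pvSentIdx
  (PySem.List.dedup keys).map
    (fun k => (k, ((rows.zip keys).filter (fun p => p.2 == k)).map (·.1)))

-- ===== PRECONDITION & SPEC =====
-- Pre_ excludes exactly the inputs where Python A raises ValueError: a tab-containing line whose
-- first '-'-field of the first tab-field is not int()-parseable.
def Pre_retrieve_sentences (tsv_lines : List String) : Prop :=
  ∀ l ∈ tsv_lines, PySem.Str.isIn "\t" l = true →
    (PySem.Int.ofStr? ((((PySem.Str.split? (((PySem.Str.split? l "\t").getD []).headD "") "-").getD []).headD ""))).isSome = true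
instance (tsv_lines : List String) : Decidable (Pre_retrieve_sentences tsv_lines) := by unfold Pre_retrieve_sentences; infer_instance
def pvWitness_retrieve_sentences : List String := ["2-1\tfoo\tB", "1\tx", "2-2\tbar", "no tab line"]

def Spec_retrieve_sentences (tsv_lines : List String) (out : List (Int × List (List String))) : Prop := out = retrieve_sentences_alt tsv_lines
instance (tsv_lines : List String) (out : List (Int × List (List String))) : Decidable (Spec_retrieve_sentences tsv_lines out) := by unfold Spec_retrieve_sentences; infer_instance

-- ===== CLAIM (what is proved, stated in full; the proofs are below) =====
def Claim_equal_retrieve_sentences : Prop := ∀ (tsv_lines : List String), Dom_retrieve_sentences tsv_lines → Pre_retrieve_sentences tsv_lines → Spec_retrieve_sentences tsv_lines (retrieve_sentences tsv_lines)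

-- ===== LEMMAS AND PROOFS =====

-- proof-local abbreviation: the tab-split rows of the tab-containing lines (B's `rows`)
def pvRows (tsv_lines : List String) : List (List String) :=
  (tsv_lines.filter (fun l => PySem.Str.isIn "\t" l)).map
    (fun l => (PySem.Str.split? l "\t").getD [])

-- inserting a fresh empty entry and then modifying it is the same as modifying directly
lemma insert_modify_fresh (d : PySem.Dict Int (List (List String))) (k : Int)
    (f : List (List String) → List (List String)) (h : d.contains k = false) :
    (d.insert k []).modify k [] f = d.modify k [] f := by
  have hmem : ∀ p ∈ d.items, (p.1 == k) = false := by
    intro p hp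
    by_contra hne
    have : d.contains k = true := by
      simp only [PySem.Dict.contains, List.any_eq_true]
      exact ⟨p, hp, by simpa using hne⟩
    simp [this] at h
  simp only [PySem.Dict.modify, PySem.Dict.getD_insert_self,
    PySem.Dict.getD_of_not_contains d _ h]
  simp only [PySem.Dict.insert, h, Bool.false_eq_true, if_false]
  simp only [List.map_append]
  rw [List.map_congr_left (g := id) (by intro p hp; simp [hmem p hp])]
  simp

-- A's loop step, with the setdefault collapsed, is a plain modify
lemma stepA_eq (d : PySem.Dict Int (List (List String))) (l : String) :
    (if PySem.Str.isIn "\t" l then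
      let l_split := (PySem.Str.split? l "\t").getD []
      let sent_idx := pvSentIdx l_split
      let d' := if d.contains sent_idx then d else d.insert sent_idx ([] : List (List String))
      d'.modify sent_idx [] (· ++ [l_split])
    else d)
    = (if PySem.Str.isIn "\t" l then
        d.modify (pvSentIdx ((PySem.Str.split? l "\t").getD [])) [] (· ++ [(PySem.Str.split? l "\t").getD []])
      else d) := by
  split_ifs with ht
  · by_cases hc : d.contains (pvSentIdx ((PySem.Str.split? l "\t").getD []))
    · simp only [hc, if_true]
    · simp only [Bool.not_eq_true] at hc
      simp only [hc, Bool.false_eq_true, if_false,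
        insert_modify_fresh _ _ _ hc]
  · rfl

-- A's guarded loop over the lines is the plain grouping loop over B's rows
lemma foldA_eq_rows (tsv_lines : List String) (d : PySem.Dict Int (List (List String))) :
    tsv_lines.foldl (fun d l =>
      if PySem.Str.isIn "\t" l then
        d.modify (pvSentIdx ((PySem.Str.split? l "\t").getD [])) [] (· ++ [(PySem.Str.split? l "\t").getD []])
      else d) d
    = (pvRows tsv_lines).foldl (fun d r => d.modify (pvSentIdx r) [] (· ++ [r])) d := by
  induction tsv_lines generalizing d with
  | nil => rfl
  | cons h t ih =>
    by_cases hh : PySem.Str.isIn "\t" h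
    · simp only [List.foldl_cons, pvRows, List.filter_cons, hh, if_true, List.map_cons]
      exact ih _
    · simp only [Bool.not_eq_true] at hh
      simp only [List.foldl_cons, pvRows, List.filter_cons, hh, Bool.false_eq_true, if_false]
      exact ih _

-- items of a dict with nodup keys are determined by its keys and getD
lemma items_eq_keys_map (d : PySem.Dict Int (List (List String))) (h : d.keys.Nodup) :
    d.items = d.keys.map (fun k => (k, d.getD k [])) := by
  unfold PySem.Dict.keys
  rw [List.map_map]
  have : ∀ p ∈ d.items, ((fun k => (k, d.getD k [])) ∘ (fun x => x.1)) p = p := by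
    intro p hp
    have h1 : d.get? p.1 = some p.2 :=
      PySem.Dict.get?_of_mem_items d (by simpa using hp) h
    simp [PySem.Dict.getD_eq_get?_getD, h1]
  rw [List.map_congr_left (g := id) this, List.map_id]

lemma zip_map_self (xs : List (List String)) (f : List String → Int) :
    xs.zip (xs.map f) = xs.map (fun x => (x, f x)) := by
  induction xs with
  | nil => rfl
  | cons a t ih => simp [ih]

lemma main_lemma (tsv_lines : List String) :
    retrieve_sentences tsv_lines = retrieve_sentences_alt tsv_lines := by
  unfold retrieve_sentences retrieve_sentences_alt
  simp only [stepA_eq]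
  rw [foldA_eq_rows]
  simp only [pvRows]
  set rows := (tsv_lines.filter (fun l => PySem.Str.isIn "\t" l)).map
    (fun l => (PySem.Str.split? l "\t").getD []) with hrows
  have hnodup : (rows.foldl (fun d (r : List String) =>
      d.modify (pvSentIdx r) [] (· ++ [r])) PySem.Dict.empty).keys.Nodup := by
    have := PySem.Dict.nodup_keys_foldl_modify_key rows pvSentIdx []
      (fun _ r => (· ++ [r])) PySem.Dict.empty (by simp [PySem.Dict.keys_empty])
    simpa using this
  have hkeys : (rows.foldl (fun d (r : List String) =>
      d.modify (pvSentIdx r) [] (· ++ [r])) PySem.Dict.empty).keys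
      = PySem.List.dedup (rows.map pvSentIdx) := by
    have := PySem.Dict.keys_foldl_modify_key rows pvSentIdx []
      (fun _ r => (· ++ [r])) PySem.Dict.empty
    simpa [PySem.Dict.keys_empty, PySem.Set.update_nil_left,
      PySem.List.dedup_eq_ofList] using this
  rw [items_eq_keys_map _ hnodup, hkeys]
  apply List.map_congr_left
  intro k hk
  have hg := PySem.Dict.getD_foldl_modify_append
    (rows.map (fun r => (pvSentIdx r, r))) PySem.Dict.empty k
  simp only [List.foldl_map] at hg
  rw [hg, PySem.Dict.getD_empty, List.nil_append]
  congr 1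
  rw [zip_map_self rows pvSentIdx]
  simp [List.filter_map, Function.comp_def]

-- ===== VERDICT (by name: the statement is the Claim_ definition above) =====
theorem retrieve_sentences_spec : Claim_equal_retrieve_sentences := by
  intro t _ _
  unfold Spec_retrieve_sentences
  exact main_lemma t
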